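-- pv_equiv track=rewrite | github.com/chhaewxn/Algorithm-Study | 프로그래머스/3/12987. 숫자 게임/숫자 게임.py | solution
-- ===== SOURCE A (Python) =====
-- def solution(A, B):
--     A.sort()
--     B.sort()
--
--     score = 0
--
--     a_idx = 0
--     b_idx = 0
--
--     while a_idx < len(A) and b_idx < len(B):
--         if B[b_idx] > A[a_idx]:
--             score += 1
--             a_idx += 1
--             b_idx += 1
--         else:
--             # 이길 수 없으면 가장 작은 수를 가진 B 버림
--             b_idx += 1
--     return score
-- ===== SOURCE B (Python) =====
-- def solution(A, B):
--     # Binary search the answer: k wins are achievable iff the k largest B's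
--     # pairwise beat the k smallest A's (sorted order pairing).
--     # Sorts A and B in place, like the original.
--     A.sort()
--     B.sort()
--     n, m = len(A), len(B)
--
--     def feasible(k):
--         return all(A[i] < B[m - k + i] for i in range(k))
--
--     lo, hi = 0, min(n, m)
--     while lo < hi:
--         mid = (lo + hi + 1) // 2
--         if feasible(mid):
--             lo = mid
--         else:
--             hi = mid - 1
--     return lo
-- ===== Notes on version B (the rewrite author's own statement) =====
-- stated objective: alternative
-- what changed: Replaces the linear greedy sweep over B with a binary search on the answer k, deciding feasibility by the closed pairing criterion that the k largest B's pairwise beat the k smallest A's (A[i] < B[m-k+i] for i < k); same in-place sorts, same return value.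
import Mathlib
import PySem

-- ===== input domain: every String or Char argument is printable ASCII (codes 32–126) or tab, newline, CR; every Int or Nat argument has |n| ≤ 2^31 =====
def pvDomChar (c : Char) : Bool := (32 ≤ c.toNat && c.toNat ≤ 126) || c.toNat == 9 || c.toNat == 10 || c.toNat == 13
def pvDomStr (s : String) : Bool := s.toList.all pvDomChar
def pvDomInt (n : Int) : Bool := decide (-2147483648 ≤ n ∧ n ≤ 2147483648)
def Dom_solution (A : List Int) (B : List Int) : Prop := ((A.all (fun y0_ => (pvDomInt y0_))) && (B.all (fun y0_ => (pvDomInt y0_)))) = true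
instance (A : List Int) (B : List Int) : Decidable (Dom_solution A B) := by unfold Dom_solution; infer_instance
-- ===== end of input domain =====

-- B replaces A's linear greedy sweep with a binary search on the answer k, deciding
-- feasibility by the pairing criterion A[i] < B[m-k+i] (alternative algorithm, same
-- O(n log n) cost); both sort their arguments in place.

-- ===== PORT A =====
-- while loop of A: walk b_idx over sorted B, advancing a_idx and score together when B wins
def aloop (As Bs : List Int) (score : Int) (aIdx bIdx : Nat) : Int :=
  if aIdx < As.length ∧ bIdx < Bs.length then
    if As.getD aIdx 0 < Bs.getD bIdx 0 then
      aloop As Bs (score + 1) (aIdx + 1) (bIdx + 1)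
    else
      aloop As Bs score aIdx (bIdx + 1)
  else score
termination_by Bs.length - bIdx

def solution (A : List Int) (B : List Int) : Int :=
  aloop (PySem.List.sorted A (fun x => x) false) (PySem.List.sorted B (fun x => x) false) 0 0 0

-- ===== PORT B =====
-- feasible(k) of Source B: all(A[i] < B[m - k + i] for i in range(k)); the indices are
-- in range whenever k ≤ min(len A, len B) (the only way Source B calls it), so plain
-- getD is exact there.
def pvFeasible (As Bs : List Int) (k : Nat) : Bool :=
  (List.range k).all (fun i => decide (As.getD i 0 < Bs.getD (Bs.length - k + i) 0))

-- while lo < hi binary-search loop of Source B (lo, hi stay ≥ 0 in Python, so Nat with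
-- Nat division matches Python's // here)
def pvBsearch (As Bs : List Int) (lo hi : Nat) : Nat :=
  if lo < hi then
    let mid := (lo + hi + 1) / 2
    if pvFeasible As Bs mid then pvBsearch As Bs mid hi
    else pvBsearch As Bs lo (mid - 1)
  else lo
termination_by hi - lo
decreasing_by all_goals omega

def solution_alt (A : List Int) (B : List Int) : Int :=
  let As := PySem.List.sorted A (fun x => x) false
  let Bs := PySem.List.sorted B (fun x => x) false
  ((pvBsearch As Bs 0 (min As.length Bs.length) : Nat) : Int)

-- ===== PRECONDITION & SPEC =====
def Spec_solution (A : List Int) (B : List Int) (out : Int) : Prop := out = solution_alt A B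
instance (A : List Int) (B : List Int) (out : Int) : Decidable (Spec_solution A B out) := by unfold Spec_solution; infer_instance

-- ===== CLAIM (what is proved, stated in full; the proofs are below) =====
def Claim_equal_solution : Prop := ∀ (A : List Int) (B : List Int), Dom_solution A B → Spec_solution A B (solution A B)

-- ===== LEMMAS AND PROOFS =====

-- the state-transition of A's loop, viewed as a fold over B with the single state s (= score = a_idx)
def pvStep (A : List Int) (s : Nat) (b : Int) : Nat :=
  if s < A.length ∧ A.getD s 0 < b then s + 1 else s

theorem pvFold_stuck (A : List Int) (l : List Int) (s : Nat) (h : A.length ≤ s) :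
    l.foldl (pvStep A) s = s := by
  induction l with
  | nil => rfl
  | cons b l ih =>
    have hstep : pvStep A s b = s := by simp [pvStep, Nat.not_lt.mpr h]
    simp [List.foldl_cons, hstep, ih]

theorem pvFold_le (A : List Int) (l : List Int) (s : Nat) (h : s ≤ A.length) :
    l.foldl (pvStep A) s ≤ A.length := by
  induction l generalizing s with
  | nil => simpa using h
  | cons b l ih =>
    apply ih
    unfold pvStep
    split <;> omega

theorem pvFold_ge (A : List Int) (l : List Int) (s : Nat) :
    s ≤ l.foldl (pvStep A) s := by
  induction l generalizing s with
  | nil => simp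
  | cons b l ih =>
    have h := ih (pvStep A s b)
    have : s ≤ pvStep A s b := by unfold pvStep; split <;> omega
    simp only [List.foldl_cons]
    omega

theorem pvFold_le_len (A : List Int) (l : List Int) (s : Nat) :
    l.foldl (pvStep A) s ≤ s + l.length := by
  induction l generalizing s with
  | nil => simp
  | cons b l ih =>
    have h := ih (pvStep A s b)
    have : pvStep A s b ≤ s + 1 := by unfold pvStep; split <;> omega
    simp only [List.foldl_cons, List.length_cons]
    omega

theorem pvGetD_mono (A : List Int) (h : A.Pairwise (· ≤ ·)) (p q : Nat) (hpq : p ≤ q)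
    (hq : q < A.length) : A.getD p 0 ≤ A.getD q 0 := by
  rcases lt_or_eq_of_le hpq with hlt | heq
  · have hp : p < A.length := by omega
    rw [List.getD_eq_getElem _ _ hp, List.getD_eq_getElem _ _ hq]
    exact List.pairwise_iff_getElem.mp h p q hp hq hlt
  · subst heq; rfl

-- the greedy fold over B equals A's while loop
theorem pvAloop_eq (As Bs : List Int) :
    ∀ (n k s : Nat), Bs.length - k ≤ n →
      aloop As Bs (s : Int) s k = (((Bs.drop k).foldl (pvStep As) s : Nat) : Int) := by
  intro n
  induction n with
  | zero =>
    intro k s h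
    have hk : Bs.length ≤ k := by omega
    rw [aloop, if_neg (by omega), List.drop_eq_nil_of_le hk]
    rfl
  | succ n ih =>
    intro k s h
    by_cases hk : k < Bs.length
    · have hdrop : Bs.drop k = Bs.getD k 0 :: Bs.drop (k + 1) := by
        rw [List.getD_eq_getElem _ _ hk]
        exact List.drop_eq_getElem_cons hk
      by_cases hs : s < As.length
      · rw [aloop, if_pos ⟨hs, hk⟩, hdrop]
        simp only [List.foldl_cons]
        by_cases hc : As.getD s 0 < Bs.getD k 0
        · rw [if_pos hc]
          have hstep : pvStep As s (Bs.getD k 0) = s + 1 := by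
            unfold pvStep; rw [if_pos ⟨hs, hc⟩]
          rw [hstep]
          have := ih (k + 1) (s + 1) (by omega)
          push_cast at this ⊢
          exact this
        · rw [if_neg hc]
          have hstep : pvStep As s (Bs.getD k 0) = s := by
            unfold pvStep; rw [if_neg (by tauto)]
          rw [hstep]
          exact ih (k + 1) s (by omega)
      · rw [aloop, if_neg (by tauto), pvFold_stuck As _ s (by omega)]
    · rw [aloop, if_neg (by omega), List.drop_eq_nil_of_le (by omega)]
      rfl

-- LOWER BOUND: any increasing family of B-indices beating A[s..s+k-1] forces the greedy ≥ s+k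
theorem pvGreedy_ge (A : List Int) :
    ∀ (L : List Int) (s k : Nat) (idx : Nat → Nat),
      s + k ≤ A.length →
      (∀ t, t < k → idx t < L.length) →
      (∀ t u, t < u → u < k → idx t < idx u) →
      (∀ t, t < k → A.getD (s + t) 0 < L.getD (idx t) 0) →
      s + k ≤ L.foldl (pvStep A) s := by
  intro L
  induction L with
  | nil =>
    intro s k idx _ hlen _ _
    cases k with
    | zero => simp
    | succ k' => exact absurd (hlen 0 (by omega)) (by simp)
  | cons b rest ih =>
    intro s k idx hA hlen hmono hbeat
    cases k with
    | zero =>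
      simpa using pvFold_ge A (b :: rest) s
    | succ k' =>
      simp only [List.foldl_cons]
      by_cases hstep : pvStep A s b = s + 1
      · rw [hstep]
        -- shift witness: use idx (t+1) - 1 into rest
        apply le_trans _ (ih (s + 1) k' (fun t => idx (t + 1) - 1) (by omega)
          (fun t ht => by
            show idx (t + 1) - 1 < rest.length
            have h1 := hlen (t + 1) (by omega)
            have h0 : 0 < idx (t + 1) := by
              have := hmono 0 (t + 1) (by omega) (by omega); omega
            simp only [List.length_cons] at h1
            omega)
          (fun t u htu hu => by
            show idx (t + 1) - 1 < idx (u + 1) - 1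
            have := hmono (t + 1) (u + 1) (by omega) (by omega)
            have h0 : 0 < idx (t + 1) := by
              have := hmono 0 (t + 1) (by omega) (by omega); omega
            omega)
          (fun t ht => by
            show A.getD (s + 1 + t) 0 < rest.getD (idx (t + 1) - 1) 0
            have hb := hbeat (t + 1) (by omega)
            have h0 : 0 < idx (t + 1) := by
              have := hmono 0 (t + 1) (by omega) (by omega); omega
            have he : (b :: rest).getD (idx (t + 1)) 0 = rest.getD (idx (t + 1) - 1) 0 := by
              rcases Nat.exists_eq_add_of_lt h0 with ⟨j, hj⟩
              have : idx (t + 1) = j + 1 := by omega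
              rw [this]; simp
            rw [← he]
            have : s + 1 + t = s + (t + 1) := by omega
            rw [this]
            exact hb))
        omega
      · -- step stays at s; then idx 0 ≠ 0 (else the step would fire)
        have hs' : pvStep A s b = s := by
          by_cases hc : s < A.length ∧ A.getD s 0 < b
          · exact absurd (by unfold pvStep; rw [if_pos hc]) hstep
          · unfold pvStep; rw [if_neg hc]
        rw [hs']
        have h00 : 0 < idx 0 := by
          by_contra h
          have hi0 : idx 0 = 0 := by omega
          have hb := hbeat 0 (by omega)
          rw [hi0] at hb
          simp at hb
          have : pvStep A s b = s + 1 := by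
            unfold pvStep; rw [if_pos ⟨by omega, by simpa using hb⟩]
          exact hstep this
        apply ih s (k' + 1) (fun t => idx t - 1) hA
          (fun t ht => by
            show idx t - 1 < rest.length
            have h1 := hlen t ht
            have h0 : 0 < idx t := by
              rcases Nat.eq_zero_or_pos t with h | h
              · rw [h]; exact h00
              · have := hmono 0 t (by omega) ht; omega
            simp only [List.length_cons] at h1
            omega)
          (fun t u htu hu => by
            show idx t - 1 < idx u - 1
            have := hmono t u htu hu
            have h0 : 0 < idx t := by
              rcases Nat.eq_zero_or_pos t with h | h
              · rw [h]; exact h00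
              · have := hmono 0 t (by omega) (by omega); omega
            omega)
          (fun t ht => by
            show A.getD (s + t) 0 < rest.getD (idx t - 1) 0
            have hb := hbeat t ht
            have h0 : 0 < idx t := by
              rcases Nat.eq_zero_or_pos t with h | h
              · rw [h]; exact h00
              · have := hmono 0 t (by omega) ht; omega
            have he : (b :: rest).getD (idx t) 0 = rest.getD (idx t - 1) 0 := by
              rcases Nat.exists_eq_add_of_lt h0 with ⟨j, hj⟩
              have : idx t = j + 1 := by omega
              rw [this]; simp
            rw [← he]
            exact hb)

-- UPPER-END STRUCTURE: the greedy's score g certifies the pairing criterion at k = g - s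
theorem pvGreedy_ok (A : List Int) :
    ∀ (L : List Int), L.Pairwise (· ≤ ·) → ∀ (s : Nat),
      ∀ t, t < L.foldl (pvStep A) s - s →
        A.getD (s + t) 0 < L.getD (L.length - (L.foldl (pvStep A) s - s) + t) 0 := by
  intro L
  induction L with
  | nil => intro _ s t ht; simp at ht
  | cons b rest ih =>
    intro hL s t ht
    have hrest : rest.Pairwise (· ≤ ·) := hL.of_cons
    simp only [List.foldl_cons] at ht ⊢
    by_cases hstep : pvStep A s b = s + 1
    · rw [hstep] at ht ⊢
      set g := rest.foldl (pvStep A) (s + 1) with hg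
      have hgs : s + 1 ≤ g := pvFold_ge A rest (s + 1)
      have hglen : g ≤ s + 1 + rest.length := pvFold_le_len A rest (s + 1)
      have hd : g - s = (g - (s + 1)) + 1 := by omega
      have hsb : A.getD s 0 < b := by
        unfold pvStep at hstep; split at hstep <;> [tauto; omega]
      cases t with
      | zero =>
        -- index is (len - (g - s)); the list head b already beats A[s], and the list is sorted
        have hidx : (b :: rest).length - (g - s) + 0 < (b :: rest).length := by
          simp; omega
        have h0 : (b :: rest).getD 0 0 = b := by simp
        calc A.getD (s + 0) 0 = A.getD s 0 := by rw [Nat.add_zero]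
          _ < b := hsb
          _ = (b :: rest).getD 0 0 := h0.symm
          _ ≤ (b :: rest).getD ((b :: rest).length - (g - s) + 0) 0 :=
            pvGetD_mono _ hL 0 _ (by omega) hidx
      | succ t' =>
        have ht' : t' < g - (s + 1) := by omega
        have := ih hrest (s + 1) t' ht'
        have e1 : s + 1 + t' = s + (t' + 1) := by omega
        have e2 : (b :: rest).getD (rest.length - (g - (s + 1)) + t' + 1) 0
            = rest.getD (rest.length - (g - (s + 1)) + t') 0 := by simp
        have e3 : (b :: rest).length - (g - s) + (t' + 1)
            = rest.length - (g - (s + 1)) + t' + 1 := by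
          simp only [List.length_cons]; omega
        rw [e3, e2, ← e1]
        exact this
    · have hs' : pvStep A s b = s := by
        by_cases hc : s < A.length ∧ A.getD s 0 < b
        · exact absurd (by unfold pvStep; rw [if_pos hc]) hstep
        · unfold pvStep; rw [if_neg hc]
      rw [hs'] at ht ⊢
      set g := rest.foldl (pvStep A) s with hg
      have hgs : s ≤ g := pvFold_ge A rest s
      have hglen : g ≤ s + rest.length := pvFold_le_len A rest s
      have := ih hrest s t ht
      have e2 : (b :: rest).getD (rest.length - (g - s) + t + 1) 0
          = rest.getD (rest.length - (g - s) + t) 0 := by simp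
      have e3 : (b :: rest).length - (g - s) + t = rest.length - (g - s) + t + 1 := by
        simp only [List.length_cons]; omega
      rw [e3, e2]
      exact this

-- pvFeasible unfolded to a Prop, for k within both lengths
theorem pvFeasible_iff (As Bs : List Int) (k : Nat) :
    pvFeasible As Bs k = true ↔ ∀ i, i < k → As.getD i 0 < Bs.getD (Bs.length - k + i) 0 := by
  simp [pvFeasible, List.all_eq_true]

-- in the binary-search range, feasibility is exactly 'k ≤ greedy score'
theorem pvFeasible_iff_le (As Bs : List Int) (hB : Bs.Pairwise (· ≤ ·))
    (k : Nat) (hk : k ≤ min As.length Bs.length) :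
    (pvFeasible As Bs k = true ↔ k ≤ Bs.foldl (pvStep As) 0) := by
  set g := Bs.foldl (pvStep As) 0 with hg
  have hgA : g ≤ As.length := pvFold_le As Bs 0 (by omega)
  have hgB : g ≤ Bs.length := by have := pvFold_le_len As Bs 0; omega
  constructor
  · intro hfeas
    have hok := (pvFeasible_iff As Bs k).mp hfeas
    have := pvGreedy_ge As Bs 0 k (fun t => Bs.length - k + t) (by omega)
      (fun t ht => by show Bs.length - k + t < Bs.length; omega)
      (fun t u htu hu => by show Bs.length - k + t < Bs.length - k + u; omega)
      (fun t ht => by show As.getD (0 + t) 0 < Bs.getD (Bs.length - k + t) 0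
                      simpa using hok t ht)
    omega
  · intro hkg
    rw [pvFeasible_iff]
    intro i hi
    have hok := pvGreedy_ok As Bs hB 0 i (by omega)
    simp only [Nat.sub_zero, Nat.zero_add] at hok
    calc As.getD i 0 < Bs.getD (Bs.length - g + i) 0 := hok
      _ ≤ Bs.getD (Bs.length - k + i) 0 :=
        pvGetD_mono Bs hB _ _ (by omega) (by omega)

-- binary search returns g whenever feasibility is 'k ≤ g' on the whole range
theorem pvBsearch_eq (As Bs : List Int) (g : Nat) :
    ∀ (n lo hi : Nat), hi - lo ≤ n → lo ≤ g → g ≤ hi →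
      (∀ k, lo ≤ k → k ≤ hi → (pvFeasible As Bs k = true ↔ k ≤ g)) →
      pvBsearch As Bs lo hi = g := by
  intro n
  induction n with
  | zero =>
    intro lo hi h h1 h2 _
    rw [pvBsearch, if_neg (by omega)]
    omega
  | succ n ih =>
    intro lo hi h h1 h2 hiff
    by_cases hlt : lo < hi
    · rw [pvBsearch, if_pos hlt]
      simp only
      set mid := (lo + hi + 1) / 2 with hmid
      have hm1 : lo < mid := by omega
      have hm2 : mid ≤ hi := by omega
      by_cases hfeas : pvFeasible As Bs mid = true
      · rw [if_pos hfeas]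
        have hmg : mid ≤ g := (hiff mid (by omega) hm2).mp hfeas
        exact ih mid hi (by omega) hmg h2 (fun k hk1 hk2 => hiff k (by omega) hk2)
      · rw [if_neg hfeas]
        have hmg : ¬ (mid ≤ g) := fun hc => hfeas ((hiff mid (by omega) hm2).mpr hc)
        exact ih lo (mid - 1) (by omega) h1 (by omega)
          (fun k hk1 hk2 => hiff k hk1 (by omega))
    · rw [pvBsearch, if_neg hlt]
      omega

-- ===== VERDICT (by name: the statement is the Claim_ definition above) =====
theorem solution_spec : Claim_equal_solution := by
  intro A B _
  unfold Spec_solution solution solution_alt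
  set As := PySem.List.sorted A (fun x => x) false with hAs
  set Bs := PySem.List.sorted B (fun x => x) false with hBs
  have hPB : Bs.Pairwise (· ≤ ·) := by
    have := PySem.List.sorted_pairwise (xs := B) (key := fun x => x)
    simpa using this
  set g := Bs.foldl (pvStep As) 0 with hg
  have hgA : g ≤ As.length := pvFold_le As Bs 0 (by omega)
  have hgB : g ≤ Bs.length := by have := pvFold_le_len As Bs 0; omega
  have hL : aloop As Bs ((0 : Nat) : Int) 0 0 = ((g : Nat) : Int) := by
    have := pvAloop_eq As Bs Bs.length 0 0 (by omega)
    simpa using this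
  have hR : pvBsearch As Bs 0 (min As.length Bs.length) = g :=
    pvBsearch_eq As Bs g (min As.length Bs.length) 0 (min As.length Bs.length)
      (by omega) (by omega) (by omega)
      (fun k _ hk2 => pvFeasible_iff_le As Bs hPB k (by omega))
  simp only [Int.natCast_zero] at hL
  rw [hL]
  show ((g : Nat) : Int) = ((pvBsearch As Bs 0 (min As.length Bs.length) : Nat) : Int)
  rw [hR]
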